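-- pv_equiv track=rewrite | github.com/Air2air/z-beam-generator | components/content/archive/generator_20250901_150608.py | _apply_word_limit
-- ===== SOURCE A (Python) =====
-- def _apply_word_limit(content: str, max_words: int) -> str:
--     """Apply word limit while preserving formatting."""
--     lines = content.split('\n')
--     result_lines = []
--     word_count = 0
--
--     for line in lines:
--         line_words = len(line.split()) if line.strip() else 0
--
--         if word_count + line_words <= max_words:
--             result_lines.append(line)
--             word_count += line_words
--         else:
--             # Add partial line if possible
--             remaining_words = max_words - word_count
--             if remaining_words > 0 and line.strip():
--                 words = line.split()
--                 truncated_line = ' '.join(words[:remaining_words])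
--                 result_lines.append(truncated_line)
--             break
--
--     return '\n'.join(result_lines)
-- ===== SOURCE B (Python) =====
-- def _apply_word_limit(content: str, max_words: int) -> str:
--     """Apply word limit preserving formatting: prefix-sum table + binary search for the cutoff line."""
--     lines = content.split('\n')
--     prefix = [0]
--     for line in lines:
--         prefix.append(prefix[-1] + len(line.split()))
--     n = len(lines)
--     # prefix is non-decreasing, so binary-search the first line whose cumulative total exceeds max_words
--     lo, hi = 0, n
--     while lo < hi:
--         mid = (lo + hi) // 2
--         if prefix[mid + 1] <= max_words:
--             lo = mid + 1
--         else:
--             hi = mid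
--     if lo == n:
--         return '\n'.join(lines)
--     kept = lines[:lo]
--     remaining = max_words - prefix[lo]
--     if remaining > 0:
--         kept.append(' '.join(lines[lo].split()[:remaining]))
--     return '\n'.join(kept)
-- ===== Notes on version B (the rewrite author's own statement) =====
-- stated objective: alternative
-- what changed: A interleaves word counting, line appending and the break in a single accumulate loop; B stages the work: it builds a prefix-sum table of per-line word counts, binary-searches that non-decreasing table for the first line whose cumulative total exceeds the limit, and then assembles the output from a slice of the lines plus an optional truncated partial line.
import Mathlib
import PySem

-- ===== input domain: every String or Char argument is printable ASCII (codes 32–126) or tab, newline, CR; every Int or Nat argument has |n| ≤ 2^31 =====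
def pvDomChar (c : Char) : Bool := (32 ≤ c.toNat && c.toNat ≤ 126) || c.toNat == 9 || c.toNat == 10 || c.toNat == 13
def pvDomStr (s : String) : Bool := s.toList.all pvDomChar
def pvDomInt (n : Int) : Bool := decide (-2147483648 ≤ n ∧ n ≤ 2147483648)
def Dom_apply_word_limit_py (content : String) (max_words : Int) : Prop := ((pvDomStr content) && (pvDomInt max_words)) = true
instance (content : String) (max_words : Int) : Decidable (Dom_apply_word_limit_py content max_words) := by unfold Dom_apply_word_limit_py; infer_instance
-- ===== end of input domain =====

-- B replaces A's interleaved accumulate-append-and-break loop by a staged algorithm: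
-- build a prefix-sum table of per-line word counts, binary-search it (it is non-decreasing)
-- for the cutoff line, then assemble the result from a slice plus an optional partial line.

-- content.split('\n'): sep is the nonempty literal "\n", so PySem.Str.split? is always `some`; exact
def pvLines (content : String) : List String := (PySem.Str.split? content "\n").getD []

-- ===== PORT A =====
-- the for-loop of A: state = (result_lines, word_count); break = return the accumulator
def pvALoop (max_words : Int) : List String → List String → Int → List String
  | [], result, _ => result
  | line :: rest, result, wc =>
    let lw : Int := if PySem.Str.strip line ≠ "" then ((PySem.Str.split₀ line).length : Int) else 0
    if wc + lw ≤ max_words then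
      pvALoop max_words rest (result ++ [line]) (wc + lw)
    else
      let remaining := max_words - wc
      if remaining > 0 ∧ PySem.Str.strip line ≠ "" then
        result ++ [PySem.Str.join " " (PySem.List.slice (PySem.Str.split₀ line) none (some remaining))]
      else
        result

def apply_word_limit_py (content : String) (max_words : Int) : String :=
  PySem.Str.join "\n" (pvALoop max_words (pvLines content) [] 0)

-- ===== PORT B =====
def pvCnt (line : String) : Int := ((PySem.Str.split₀ line).length : Int)

-- Source B's prefix-building loop, carrying prefix[-1] as the accumulator; result = tail of the table
def pvPrefixGo : Int → List String → List Int
  | _, [] => []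
  | t, l :: ls => (t + pvCnt l) :: pvPrefixGo (t + pvCnt l) ls

-- Source B's binary-search while-loop; Python's prefix[mid+1] is always in range here
-- (0 ≤ mid+1 ≤ hi ≤ len(lines) < len(prefix)), so getD with default 0 is exact
def pvBS (pre : List Int) (mw : Int) (lo hi : Nat) : Nat :=
  if _h : lo < hi then
    if pre.getD ((lo + hi) / 2 + 1) 0 ≤ mw then pvBS pre mw ((lo + hi) / 2 + 1) hi
    else pvBS pre mw lo ((lo + hi) / 2)
  else lo
termination_by hi - lo
decreasing_by all_goals omega

def apply_word_limit_py_alt (content : String) (max_words : Int) : String :=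
  let lines := pvLines content
  let pref := 0 :: pvPrefixGo 0 lines
  let n := lines.length
  let cut := pvBS pref max_words 0 n
  if cut == n then
    PySem.Str.join "\n" lines
  else
    let kept := PySem.List.slice lines none (some ((cut : Nat) : Int))   -- lines[:lo]
    let remaining := max_words - pref.getD cut 0                        -- prefix[lo], in range since cut < n
    let kept := if remaining > 0 then
        kept ++ [PySem.Str.join " " (PySem.List.slice (PySem.Str.split₀ (lines.getD cut "")) none (some remaining))]
      else kept
    PySem.Str.join "\n" kept

-- ===== PRECONDITION & SPEC =====
def Spec_apply_word_limit_py (content : String) (max_words : Int) (out : String) : Prop := out = apply_word_limit_py_alt content max_words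
instance (content : String) (max_words : Int) (out : String) : Decidable (Spec_apply_word_limit_py content max_words out) := by unfold Spec_apply_word_limit_py; infer_instance

-- ===== CLAIM (what is proved, stated in full; the proofs are below) =====
def Claim_equal_apply_word_limit_py : Prop := ∀ (content : String) (max_words : Int), Dom_apply_word_limit_py content max_words → Spec_apply_word_limit_py content max_words (apply_word_limit_py content max_words)

-- ===== LEMMAS AND PROOFS =====

-- proof-only linear first-crossing scan: reference point between the two ports
def pvBFind (max_words : Int) : List Int → Int → Option (Nat × Int)
  | [], _ => none
  | c :: rest, total =>
    if total + c > max_words then some (0, total)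
    else (pvBFind max_words rest (total + c)).map (fun p => (p.1 + 1, p.2))

-- the full prefix table
def pvPre (t : Int) (lines : List String) : List Int := t :: pvPrefixGo t lines

lemma pvPre_cons (t : Int) (l : String) (ls : List String) :
    pvPre t (l :: ls) = t :: pvPre (t + pvCnt l) ls := rfl

lemma pvCnt_nonneg (l : String) : 0 ≤ pvCnt l := Int.natCast_nonneg _

lemma pvPre_step : ∀ (lines : List String) (t : Int) (i : Nat), i < lines.length →
    (pvPre t lines).getD i 0 ≤ (pvPre t lines).getD (i + 1) 0 := by
  intro lines
  induction lines with
  | nil => intro t i h; simp at h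
  | cons l ls ih =>
    intro t i h
    rw [pvPre_cons]
    cases i with
    | zero =>
      have := pvCnt_nonneg l
      cases ls with
      | nil => simp [pvPre, pvPrefixGo]; omega
      | cons l2 ls2 => simp [pvPre, pvPrefixGo]; omega
    | succ j =>
      simp only [List.getD_cons_succ]
      exact ih (t + pvCnt l) j (by simpa using h)

lemma pvPre_mono (lines : List String) (t : Int) (i j : Nat) (hij : i ≤ j)
    (hj : j ≤ lines.length) : (pvPre t lines).getD i 0 ≤ (pvPre t lines).getD j 0 := by
  induction j with
  | zero => simp_all
  | succ k ih =>
    rcases Nat.lt_or_ge i (k + 1) with h | h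
    · calc (pvPre t lines).getD i 0 ≤ (pvPre t lines).getD k 0 := ih (by omega) (by omega)
        _ ≤ _ := pvPre_step lines t k (by omega)
    · have : i = k + 1 := by omega
      simp [this]

-- binary search returns the first index r ≤ n with prefix[r+1] > mw (n if none)
lemma pvBS_inv (pre : List Int) (mw : Int) (n : Nat)
    (hant : ∀ i j : Nat, i ≤ j → j < n → pre.getD (j + 1) 0 ≤ mw → pre.getD (i + 1) 0 ≤ mw) :
    ∀ (lo hi : Nat), lo ≤ hi → hi ≤ n → (∀ i, i < lo → pre.getD (i + 1) 0 ≤ mw) →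
    (hi = n ∨ ¬ pre.getD (hi + 1) 0 ≤ mw) →
    (∀ i, i < pvBS pre mw lo hi → pre.getD (i + 1) 0 ≤ mw) ∧
    (pvBS pre mw lo hi = n ∨ ¬ pre.getD (pvBS pre mw lo hi + 1) 0 ≤ mw) ∧
    pvBS pre mw lo hi ≤ n := by
  intro lo hi
  induction hfuel : hi - lo using Nat.strong_induction_on generalizing lo hi with
  | _ fuel ih =>
    intro hle hn hlo hhi
    rw [pvBS]
    by_cases h : lo < hi
    · rw [dif_pos h]
      have hmid1 : (lo + hi) / 2 < hi := by omega
      have hmid2 : lo ≤ (lo + hi) / 2 := by omega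
      by_cases hq : pre.getD ((lo + hi) / 2 + 1) 0 ≤ mw
      · rw [if_pos hq]
        refine ih (hi - ((lo + hi) / 2 + 1)) (by omega) _ _ rfl (by omega) hn ?_ hhi
        intro i hi'
        exact hant i ((lo + hi) / 2) (by omega) (by omega) hq
      · rw [if_neg hq]
        exact ih ((lo + hi) / 2 - lo) (by omega) _ _ rfl (by omega) (by omega) hlo (Or.inr hq)
    · rw [dif_neg h]
      have : lo = hi := by omega
      subst this
      exact ⟨hlo, hhi, hn⟩

-- characterization of the linear scan in terms of the prefix table
lemma pvBFind_char (m : Int) : ∀ (lines : List String) (t : Int),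
    (pvBFind m (lines.map pvCnt) t = none → ∀ i, i < lines.length → (pvPre t lines).getD (i + 1) 0 ≤ m) ∧
    (∀ i tot, pvBFind m (lines.map pvCnt) t = some (i, tot) →
      i < lines.length ∧ (∀ j, j < i → (pvPre t lines).getD (j + 1) 0 ≤ m) ∧
      ¬ (pvPre t lines).getD (i + 1) 0 ≤ m ∧ tot = (pvPre t lines).getD i 0) := by
  intro lines
  induction lines with
  | nil => intro t; constructor
           · intro _ i hi; simp at hi
           · intro i tot h; simp [pvBFind] at h
  | cons l ls ih =>
    intro t
    rw [pvPre_cons]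
    constructor
    · intro hnone i hi
      simp only [List.map_cons, pvBFind] at hnone
      by_cases hgt : t + pvCnt l > m
      · simp [hgt] at hnone
      · rw [if_neg hgt, Option.map_eq_none_iff] at hnone
        cases i with
        | zero => simpa using (by omega : t + pvCnt l ≤ m)
        | succ j =>
          simp only [List.getD_cons_succ]
          exact (ih (t + pvCnt l)).1 hnone j (by simpa using hi)
    · intro i tot hsome
      simp only [List.map_cons, pvBFind] at hsome
      by_cases hgt : t + pvCnt l > m
      · rw [if_pos hgt] at hsome
        injection hsome with h
        injection h with h1 h2
        subst h1; subst h2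
        refine ⟨by simp, by omega, ?_, by simp⟩
        simpa using (by omega : ¬ t + pvCnt l ≤ m)
      · rw [if_neg hgt, Option.map_eq_some_iff] at hsome
        obtain ⟨⟨i', tot'⟩, hfind, heq⟩ := hsome
        injection heq with h1 h2
        simp only at h1 h2
        subst h1; subst h2
        obtain ⟨hlen, hbefore, hcross, htot⟩ := (ih (t + pvCnt l)).2 i' tot' hfind
        refine ⟨by simpa using Nat.succ_lt_succ hlen, ?_, by simpa using hcross, by simpa using htot⟩
        intro j hj
        cases j with
        | zero => simpa using (by omega : t + pvCnt l ≤ m)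
        | succ k => simpa using hbefore k (by omega)

lemma pv_go_eq_nil (s : List Char) : ∀ (cur : List Char) (acc : List (List Char)),
    PySem.Chars.split₀.go s cur acc = [] → acc = [] ∧ cur = [] ∧ ∀ c ∈ s, PySem.Chars.isspace c = true := by
  induction s with
  | nil =>
    intro cur acc h
    by_cases hc : cur.isEmpty
    · simp [PySem.Chars.split₀.go, hc] at h
      simp_all [List.isEmpty_iff]
    · simp [PySem.Chars.split₀.go, hc] at h
  | cons c rest ih =>
    intro cur acc h
    by_cases hs : PySem.Chars.isspace c
    · by_cases hc : cur.isEmpty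
      · simp [PySem.Chars.split₀.go, hs, hc] at h
        rcases ih _ _ h with ⟨ha, _, hall⟩
        exact ⟨ha, List.isEmpty_iff.mp hc, by simpa [hs] using hall⟩
      · simp [PySem.Chars.split₀.go, hs, hc] at h
        rcases ih _ _ h with ⟨ha, _, _⟩
        simp at ha
    · simp [PySem.Chars.split₀.go, hs] at h
      rcases ih _ _ h with ⟨_, hcur, _⟩
      simp at hcur

lemma pv_go_all (s : List Char) (h : ∀ c ∈ s, PySem.Chars.isspace c = true) :
    PySem.Chars.split₀.go s [] [] = [] := by
  induction s with
  | nil => simp [PySem.Chars.split₀.go]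
  | cons c rest ih =>
    have hc : PySem.Chars.isspace c = true := h c (by simp)
    simp only [PySem.Chars.split₀.go, hc, if_true, List.isEmpty_nil]
    exact ih (fun c hm => h c (by simp [hm]))

lemma pv_strip_nil_iff (s : List Char) :
    PySem.Chars.strip s = [] ↔ ∀ c ∈ s, PySem.Chars.isspace c = true := by
  constructor
  · intro h c hc
    by_contra hns
    have hsplit : s = s.takeWhile PySem.Chars.isspace ++ s.dropWhile PySem.Chars.isspace :=
      (List.takeWhile_append_dropWhile).symm
    rcases List.mem_append.mp (hsplit ▸ hc) with hm | hm
    · exact hns (List.mem_takeWhile_imp hm)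
    · have hl : PySem.Chars.lstrip s ≠ [] := List.ne_nil_of_mem hm
      have hall : ∀ c ∈ (PySem.Chars.lstrip s).reverse, PySem.Chars.isspace c = true :=
        List.dropWhile_eq_nil_iff.mp (by simpa [PySem.Chars.strip, PySem.Chars.rstrip] using h)
      have hhead : ¬ PySem.Chars.isspace ((List.dropWhile PySem.Chars.isspace s).head hl) = true :=
        by simpa using List.head_dropWhile_not PySem.Chars.isspace hl
      exact hhead (hall _ (by simp [PySem.Chars.lstrip, List.mem_reverse, List.head_mem]))
  · intro h
    have : PySem.Chars.lstrip s = [] := List.dropWhile_eq_nil_iff.mpr h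
    simp [PySem.Chars.strip, this, PySem.Chars.rstrip]

lemma pv_strip_empty_iff_split₀_nil (s : String) :
    PySem.Str.strip s = "" ↔ PySem.Str.split₀ s = [] := by
  have h1 : (PySem.Str.strip s = "") ↔ PySem.Chars.strip s.toList = [] := by
    constructor
    · intro h; rw [← PySem.Str.toList_strip, h]; exact String.toList_empty
    · intro h
      apply String.toList_eq_nil_iff.mp
      rw [PySem.Str.toList_strip]; exact h
  have h2 : (PySem.Str.split₀ s = []) ↔ PySem.Chars.split₀ s.toList = [] := by
    constructor
    · intro h
      have := PySem.Str.split₀_map_toList s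
      rw [h] at this; simpa using this.symm
    · intro h
      have : PySem.Str.split₀ s = List.map String.ofList (PySem.Chars.split₀ s.toList) := rfl
      simp [this, h]
  rw [h1, h2, pv_strip_nil_iff]
  constructor
  · intro h; exact pv_go_all _ h
  · intro h; exact (pv_go_eq_nil _ _ _ h).2.2

lemma pv_lw_eq (line : String) :
    (if PySem.Str.strip line ≠ "" then ((PySem.Str.split₀ line).length : Int) else 0) = pvCnt line := by
  unfold pvCnt
  by_cases h : PySem.Str.strip line = ""
  · have := (pv_strip_empty_iff_split₀_nil line).mp h
    simp [h, this]
  · simp [h]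

lemma pv_main (m : Int) (lines : List String) : ∀ (result : List String) (wc : Int),
    pvALoop m lines result wc =
      match pvBFind m (lines.map pvCnt) wc with
      | none => result ++ lines
      | some p => result ++ lines.take p.1 ++
          (if m - p.2 > 0 then
            [PySem.Str.join " " (PySem.List.slice (PySem.Str.split₀ (lines.getD p.1 "")) none (some (m - p.2)))]
          else []) := by
  induction lines with
  | nil => intro result wc; simp [pvALoop, pvBFind]
  | cons line rest ih =>
    intro result wc
    rw [List.map_cons]
    simp only [pvALoop, pv_lw_eq line]
    by_cases hle : wc + pvCnt line ≤ m
    · rw [if_pos hle, ih]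
      have hnb : ¬ (wc + pvCnt line > m) := by omega
      simp only [pvBFind, if_neg hnb]
      cases hf : pvBFind m (rest.map pvCnt) (wc + pvCnt line) with
      | none => simp
      | some p => simp [List.take_succ_cons]
    · rw [if_neg hle]
      have hgt : wc + pvCnt line > m := by omega
      simp only [pvBFind, if_pos hgt]
      by_cases hr : m - wc > 0
      · have hcnt : pvCnt line > 0 := by omega
        have hne : PySem.Str.split₀ line ≠ [] := by
          intro h; unfold pvCnt at hcnt; rw [h] at hcnt; simp at hcnt
        have hstrip : PySem.Str.strip line ≠ "" := by
          intro h; exact hne ((pv_strip_empty_iff_split₀_nil line).mp h)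
        have hr' : wc < m := by omega
        simp [hr', hstrip]
      · have hr' : ¬ wc < m := by omega
        simp [hr']

-- ===== VERDICT (by name: the statement is the Claim_ definition above) =====
theorem apply_word_limit_py_spec : Claim_equal_apply_word_limit_py := by
  intro content max_words _
  unfold Spec_apply_word_limit_py apply_word_limit_py apply_word_limit_py_alt
  simp only [letFun]
  rw [pv_main]
  set lines := pvLines content with hlines
  set n := lines.length with hn
  have hpre : (0 : Int) :: pvPrefixGo 0 lines = pvPre 0 lines := rfl
  rw [hpre]
  have hant : ∀ i j : Nat, i ≤ j → j < n →
      (pvPre 0 lines).getD (j + 1) 0 ≤ max_words → (pvPre 0 lines).getD (i + 1) 0 ≤ max_words := by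
    intro i j hij hj h
    exact le_trans (pvPre_mono lines 0 (i + 1) (j + 1) (by omega) (by omega)) h
  cases hf : pvBFind max_words (lines.map pvCnt) 0 with
  | none =>
    have hall := (pvBFind_char max_words lines 0).1 hf
    obtain ⟨hbefore, hend, hle⟩ :=
      pvBS_inv (pvPre 0 lines) max_words n hant 0 n (by omega) (by omega)
        (by intro i hi; omega) (Or.inl rfl)
    have hr : pvBS (pvPre 0 lines) max_words 0 n = n := by
      rcases hend with h | h
      · exact h
      · by_contra hne
        exact h (hall _ (by omega))
    simp [hr]
  | some p =>
    obtain ⟨hlen, hbefore', hcross, htot⟩ := (pvBFind_char max_words lines 0).2 p.1 p.2 (by simpa using hf)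
    obtain ⟨hbefore, hend, hle⟩ :=
      pvBS_inv (pvPre 0 lines) max_words n hant 0 n (by omega) (by omega)
        (by intro i hi; omega) (Or.inl rfl)
    have hr : pvBS (pvPre 0 lines) max_words 0 n = p.1 := by
      rcases Nat.lt_trichotomy (pvBS (pvPre 0 lines) max_words 0 n) p.1 with h | h | h
      · rcases hend with he | he
        · omega
        · exact absurd (hbefore' _ h) he
      · exact h
      · exact absurd (hbefore _ h) hcross
    simp only [hr, PySem.List.slice_to_natCast, ← htot]
    have hne : (p.1 == n) ≠ true := by simp; omega
    rw [if_neg hne]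
    by_cases hrem : p.2 < max_words
    · simp [hrem]
    · simp [hrem]
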